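-- pv_equiv track=rewrite | github.com/LogicOber/dify-plugin-automation | utils/file_operations.py | clean_xml_tags
-- ===== SOURCE A (Python) =====
-- def clean_xml_tags(content):
--     """Clean XML tags from content
--
--     This function removes any XML tags that might be present in the content,
--     particularly focusing on closing tags that might have been included.
--
--     Args:
--         content (str): The content to clean
--
--     Returns:
--         str: The cleaned content
--     """
--     # Remove common XML closing tags that might be in the content
--     closing_tags = [
--         "</readme>", "</README>",
--         "</privacy_policy>", "</PRIVACY_POLICY>",
--         "</R>", "</P>"
--     ]
--
--     cleaned_content = content
--     for tag in closing_tags: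
--         cleaned_content = cleaned_content.replace(tag, "")
--
--     return cleaned_content
-- ===== SOURCE B (Python) =====
-- def clean_xml_tags(content):
--     """Clean XML tags from content (explicit scan instead of str.replace)."""
--     closing_tags = [
--         "</readme>", "</README>",
--         "</privacy_policy>", "</PRIVACY_POLICY>",
--         "</R>", "</P>"
--     ]
--     result = content
--     for tag in closing_tags:
--         pieces = []
--         i = 0
--         while i < len(result):
--             if result.startswith(tag, i):
--                 i += len(tag)
--             else:
--                 pieces.append(result[i])
--                 i += 1
--         result = "".join(pieces)
--     return result
-- ===== Notes on version B (the rewrite author's own statement) =====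
-- stated objective: alternative
-- what changed: Each str.replace pass is replaced by a hand-written left-to-right scan that skips a tag when the string starts with it at the current index and copies the character otherwise, assembling the result from collected pieces.
import Mathlib
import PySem

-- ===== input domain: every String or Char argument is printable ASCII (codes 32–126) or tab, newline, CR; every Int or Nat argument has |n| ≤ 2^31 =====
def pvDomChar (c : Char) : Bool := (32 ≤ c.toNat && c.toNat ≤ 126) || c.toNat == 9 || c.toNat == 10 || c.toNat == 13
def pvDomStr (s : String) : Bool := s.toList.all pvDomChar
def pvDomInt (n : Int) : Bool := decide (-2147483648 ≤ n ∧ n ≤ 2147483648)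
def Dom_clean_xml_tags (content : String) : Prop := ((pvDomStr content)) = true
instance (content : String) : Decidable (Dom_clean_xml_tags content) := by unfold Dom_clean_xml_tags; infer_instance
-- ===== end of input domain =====

-- B replaces each builtin str.replace pass with an explicit index scan (skip the tag where it starts, copy a char otherwise); same result, similar cost.


-- ===== PORT A =====
def closingTags : List String :=
  ["</readme>", "</README>", "</privacy_policy>", "</PRIVACY_POLICY>", "</R>", "</P>"]

def clean_xml_tags (content : String) : String :=
  closingTags.foldl (fun cleaned tag => PySem.Str.replace cleaned tag "") content

-- ===== PORT B =====
-- the explicit scan of Source B: at each index either skip the tag (when the string starts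
-- with it there) or keep one character; written as recursion on the char list
def stripTag (tag : List Char) : List Char → List Char
  | [] => []
  | c :: t =>
    if tag.isPrefixOf (c :: t) then stripTag tag (t.drop (tag.length - 1))
    else c :: stripTag tag t
termination_by l => l.length
decreasing_by
  · simp only [List.length_cons, List.length_drop]
    omega
  · simp

def closingTagsB : List (List Char) :=
  ["</readme>".toList, "</README>".toList, "</privacy_policy>".toList,
   "</PRIVACY_POLICY>".toList, "</R>".toList, "</P>".toList]

def clean_xml_tags_alt (content : String) : String :=
  String.ofList (closingTagsB.foldl (fun result tag => stripTag tag result) content.toList)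

-- ===== PRECONDITION & SPEC =====
def Spec_clean_xml_tags (content : String) (out : String) : Prop := out = clean_xml_tags_alt content
instance (content : String) (out : String) : Decidable (Spec_clean_xml_tags content out) := by unfold Spec_clean_xml_tags; infer_instance

-- ===== CLAIM (what is proved, stated in full; the proofs are below) =====
def Claim_equal_clean_xml_tags : Prop := ∀ (content : String), Dom_clean_xml_tags content → Spec_clean_xml_tags content (clean_xml_tags content)

-- ===== LEMMAS AND PROOFS =====

-- the fuel-based replace loop (new = []) is the same computation as stripTag
theorem go_eq_stripTag (tag : List Char) (htag : tag ≠ []) :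
    ∀ (fuel : Nat) (l acc : List Char), l.length ≤ fuel →
      PySem.Chars.replace.go tag [] fuel l acc = acc.reverse ++ stripTag tag l := by
  intro fuel
  induction fuel with
  | zero =>
    intro l acc hl
    have : l = [] := List.eq_nil_of_length_eq_zero (Nat.le_zero.mp hl)
    subst this
    simp [PySem.Chars.replace.go, stripTag]
  | succ n ih =>
    intro l acc hl
    cases l with
    | nil => simp [PySem.Chars.replace.go, stripTag]
    | cons c t =>
      rw [PySem.Chars.replace.go]
      by_cases h : tag.isPrefixOf (c :: t)
      · have hlen : 1 ≤ tag.length := by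
          cases tag with
          | nil => exact absurd rfl htag
          | cons _ _ => simp
        have hdrop : (c :: t).drop tag.length = t.drop (tag.length - 1) := by
          cases tag with
          | nil => exact absurd rfl htag
          | cons _ _ => simp
        simp only [h, if_true, List.reverse_nil, List.nil_append]
        rw [hdrop, ih (t.drop (tag.length - 1)) acc (by simp only [List.length_drop]; simp only [List.length_cons] at hl; omega)]
        rw [stripTag, if_pos h]
      · simp only [h]
        rw [ih t (c :: acc) (by simpa using Nat.le_of_succ_le_succ hl)]
        rw [stripTag, if_neg h]
        simp

theorem replace_eq_stripTag (tag : List Char) (htag : tag ≠ []) (s : List Char) :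
    PySem.Chars.replace s tag [] = stripTag tag s := by
  rw [PySem.Chars.replace]
  rw [if_neg (by simp [List.isEmpty_iff, htag])]
  simpa using go_eq_stripTag tag htag s.length s [] (le_refl _)

theorem step_eq (s : String) (tag : String) (htag : tag.toList ≠ []) :
    (PySem.Str.replace s tag "").toList = stripTag tag.toList s.toList := by
  rw [PySem.Str.toList_replace]
  simpa using replace_eq_stripTag tag.toList htag s.toList

-- ===== VERDICT (by name: the statement is the Claim_ definition above) =====
theorem clean_xml_tags_spec : Claim_equal_clean_xml_tags := by
  intro content _
  show clean_xml_tags content = clean_xml_tags_alt content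
  have h : (clean_xml_tags content).toList
      = closingTagsB.foldl (fun result tag => stripTag tag result) content.toList := by
    simp only [clean_xml_tags, closingTags, closingTagsB, List.foldl]
    rw [step_eq _ _ (by decide), step_eq _ _ (by decide), step_eq _ _ (by decide),
        step_eq _ _ (by decide), step_eq _ _ (by decide), step_eq _ _ (by decide)]
  apply String.toList_inj.mp
  rw [h]
  simp [clean_xml_tags_alt]
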